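-- pv_equiv track=rewrite | github.com/lycantropos/Project-Euler | 61.py | posterity
-- ===== SOURCE A (Python) =====
-- from typing import (Any,
--                     Iterable,
--                     Sequence,
--                     Dict,
--                     Tuple,
--                     List)
--
-- def posterity(parent: str,
--               relations_group: Iterable[Dict[str, Sequence[str]]]
--               ) -> Iterable[List[str]]:
--     try:
--         relations, *rest = relations_group
--         children = relations[parent]
--     except (ValueError, KeyError):
--         yield [parent]
--     else:
--         for child in children:
--             for descendants in posterity(child, rest):
--                 yield [parent] + descendants
-- ===== SOURCE B (Python) =====
-- def posterity(parent, relations_group):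
--     levels = list(relations_group)
--     stack = [(parent, 0, [parent])]
--     while stack:
--         node, i, path = stack.pop()
--         if i >= len(levels) or node not in levels[i]:
--             yield path
--         else:
--             # push children reversed so the LIFO pop order matches left-to-right pre-order
--             for child in reversed(levels[i][node]):
--                 stack.append((child, i + 1, path + [child]))
-- ===== Notes on version B (the rewrite author's own statement) =====
-- stated objective: alternative
-- what changed: Replaces A's recursive generator over (head, rest) of the relations iterable with an explicit-stack iterative DFS over a materialized levels list, entries (node, level_index, path), children pushed reversed to keep pre-order.
import Mathlib
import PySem

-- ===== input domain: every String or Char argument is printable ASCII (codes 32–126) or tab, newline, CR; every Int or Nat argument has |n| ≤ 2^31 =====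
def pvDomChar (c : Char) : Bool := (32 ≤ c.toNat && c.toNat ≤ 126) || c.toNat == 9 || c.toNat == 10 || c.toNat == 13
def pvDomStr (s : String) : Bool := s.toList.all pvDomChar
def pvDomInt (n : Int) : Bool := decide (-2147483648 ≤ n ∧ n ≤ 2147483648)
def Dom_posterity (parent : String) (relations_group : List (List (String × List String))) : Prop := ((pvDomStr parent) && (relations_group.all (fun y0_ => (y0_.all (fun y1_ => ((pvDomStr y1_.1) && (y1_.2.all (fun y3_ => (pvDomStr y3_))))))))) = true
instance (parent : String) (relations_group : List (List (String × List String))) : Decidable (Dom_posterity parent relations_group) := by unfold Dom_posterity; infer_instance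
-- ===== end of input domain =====

-- B replaces A's recursive generator with an explicit-stack iterative DFS over a
-- materialized list of levels (objective: alternative decomposition, same cost).

-- ===== PORT A =====
-- A: 'relations, *rest = relations_group' raises ValueError on an empty iterable,
-- 'relations[parent]' raises KeyError when absent; both are caught and yield [parent].
def posterity (parent : String) (relations_group : List (List (String × List String))) : List (List String) :=
  match relations_group with
  | [] => [[parent]]                       -- ValueError branch
  | relations :: rest =>
    match (PySem.Dict.mk relations).get? parent with
    | none => [[parent]]                   -- KeyError branch
    | some children =>
      children.flatMap (fun child => (posterity child rest).map (fun descendants => parent :: descendants))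
termination_by relations_group.length
decreasing_by simp

-- ===== PORT B =====
-- termination helpers (Lean-only; not part of B's algorithm)
def pvCap (lvl : List (String × List String)) : Nat :=
  lvl.foldr (fun kv m => max kv.2.length m) 0

def pvW : List (List (String × List String)) → Nat
  | [] => 1
  | lvl :: rest => 1 + pvCap lvl * pvW rest

lemma pvW_pos (ls : List (List (String × List String))) : 0 < pvW ls := by
  cases ls <;> simp [pvW]

lemma pvCap_of_get? (lvl : List (String × List String)) (n : String) (cs : List String)
    (h : (PySem.Dict.mk lvl).get? n = some cs) : cs.length ≤ pvCap lvl := by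
  induction lvl with
  | nil => simp [PySem.Dict.get?] at h
  | cons kv rest ih =>
    rw [PySem.Dict.get?_mk_cons] at h
    by_cases hk : kv.1 == n
    · simp [hk] at h
      subst h
      simp [pvCap]
    · simp [hk] at h
      have := ih h
      simp only [pvCap, List.foldr] at *
      omega

lemma pvDrop_of_getElem? (levels : List (List (String × List String))) (i : Nat)
    (lvl : List (String × List String)) (h : levels[i]? = some lvl) :
    levels.drop i = lvl :: levels.drop (i + 1) := by
  have hi : i < levels.length := by
    by_contra hc
    rw [List.getElem?_eq_none (by omega)] at h
    simp at h
  rw [List.drop_eq_getElem_cons hi]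
  have : levels[i] = lvl := by
    have := List.getElem?_eq_getElem hi
    rw [this] at h; exact Option.some.inj h
  rw [this]

-- pop from the end of the Python stack ↔ head of this list; pushing the children
-- reversed (as Source B does) makes the new stack top the FIRST child, i.e. the new
-- stack is (children.map …) ++ stack with the head as top.
def pvLoop (levels : List (List (String × List String))) :
    List (String × Nat × List String) → List (List String) → List (List String)
  | [], acc => acc
  | (node, i, path) :: stack, acc =>
    match h1 : levels[i]? with
    | none => pvLoop levels stack (acc ++ [path])
    | some lvl =>
      match h2 : (PySem.Dict.mk lvl).get? node with
      | none => pvLoop levels stack (acc ++ [path])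
      | some children =>
          pvLoop levels ((children.map (fun c => (c, i + 1, path ++ [c]))) ++ stack) acc
termination_by stack _ => (stack.map (fun e => pvW (levels.drop e.2.1))).sum
decreasing_by
  · have := pvW_pos (levels.drop i); simp; omega
  · have := pvW_pos (levels.drop i); simp; omega
  · have hdrop := pvDrop_of_getElem? levels i lvl h1
    have hcap := pvCap_of_get? lvl node children h2
    have hsum : ((children.map (fun c => (c, i + 1, path ++ [c]))).map
        (fun e => pvW (levels.drop e.2.1))).sum = children.length * pvW (levels.drop (i + 1)) := by
      simp only [List.map_map, Function.comp_def]
      exact PySem.List.sum_map_const_nat children _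
    have hle : children.length * pvW (levels.drop (i + 1)) ≤ pvCap lvl * pvW (levels.drop (i + 1)) :=
      Nat.mul_le_mul_right _ hcap
    simp only [List.map_append, List.sum_append, List.map_cons, List.sum_cons, hsum, hdrop, pvW]
    omega

def posterity_alt (parent : String) (relations_group : List (List (String × List String))) : List (List String) :=
  pvLoop relations_group [(parent, 0, [parent])] []

-- ===== PRECONDITION & SPEC =====
def Spec_posterity (parent : String) (relations_group : List (List (String × List String))) (out : List (List String)) : Prop := out = posterity_alt parent relations_group
instance (parent : String) (relations_group : List (List (String × List String))) (out : List (List String)) : Decidable (Spec_posterity parent relations_group out) := by unfold Spec_posterity; infer_instance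

-- ===== CLAIM (what is proved, stated in full; the proofs are below) =====
def Claim_equal_posterity : Prop := ∀ (parent : String) (relations_group : List (List (String × List String))), Dom_posterity parent relations_group → Spec_posterity parent relations_group (posterity parent relations_group)

-- ===== LEMMAS AND PROOFS =====

-- every path A yields starts with the node it was called on
lemma posterity_head (n : String) (rest : List (List (String × List String)))
    (d : List String) (hd : d ∈ posterity n rest) : ∃ t, d = n :: t := by
  cases rest with
  | nil =>
    simp [posterity] at hd
    exact ⟨[], hd⟩
  | cons relations rest =>
    rw [posterity] at hd
    cases hget : (PySem.Dict.mk relations).get? n with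
    | none =>
      rw [hget] at hd
      simp at hd
      exact ⟨[], hd⟩
    | some children =>
      rw [hget] at hd
      simp [List.mem_flatMap] at hd
      obtain ⟨c, _, d', _, hd'⟩ := hd
      exact ⟨d', hd'.symm⟩

-- the stack loop computes, for each pending entry, exactly the paths A's recursion
-- produces from that node through the remaining levels, appended to its path prefix
lemma pvLoop_spec (levels : List (List (String × List String)))
    (stack : List (String × Nat × List String)) (acc : List (List String)) :
    pvLoop levels stack acc =
      acc ++ stack.flatMap
        (fun e => (posterity e.1 (levels.drop e.2.1)).map (fun d => e.2.2 ++ d.drop 1)) := by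
  induction stack, acc using pvLoop.induct levels with
  | case1 acc => simp [pvLoop]
  | case2 node i path stack acc h1 ih =>
    have hdrop : levels.drop i = [] := List.drop_eq_nil_of_le (by
      by_contra hc
      rw [List.getElem?_eq_getElem (by omega)] at h1
      simp at h1)
    rw [pvLoop, h1, ih]
    simp [hdrop, posterity]
  | case3 node i path stack acc lvl h1 h2 ih =>
    have hdrop := pvDrop_of_getElem? levels i lvl h1
    rw [pvLoop, h1]
    split
    next heq => simp at heq
    next lvl' heq =>
      obtain rfl : lvl = lvl' := Option.some.inj heq
      split
      next heq2 =>
        rw [ih]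
        simp [hdrop, posterity, h2]
      next children heq2 =>
        rw [h2] at heq2
        simp at heq2
  | case4 node i path stack acc lvl h1 children h2 ih =>
    have hdrop := pvDrop_of_getElem? levels i lvl h1
    rw [pvLoop, h1]
    split
    next heq => simp at heq
    next lvl' heq =>
      obtain rfl : lvl = lvl' := Option.some.inj heq
      split
      next heq2 =>
        rw [h2] at heq2
        simp at heq2
      next children' heq2 =>
        rw [h2] at heq2
        obtain rfl : children = children' := Option.some.inj heq2
        rw [ih]
        simp only [List.flatMap_append, List.flatMap_cons, hdrop, posterity, h2, List.map_flatMap,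
          List.flatMap_map, List.append_assoc]
        congr 1
        congr 1
        apply List.flatMap_congr
        intro c hc
        rw [List.map_map]
        apply List.map_congr_left
        intro d hd
        obtain ⟨t, rfl⟩ := posterity_head c (levels.drop (i + 1)) d hd
        simp

-- ===== VERDICT (by name: the statement is the Claim_ definition above) =====
theorem posterity_spec : Claim_equal_posterity := by
  intro parent relations_group _
  unfold Spec_posterity posterity_alt
  rw [pvLoop_spec]
  simp only [List.flatMap_cons, List.flatMap_nil, List.drop_zero, List.nil_append, List.append_nil]
  symm
  refine (List.map_congr_left ?_).trans (List.map_id _)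
  intro d hd
  obtain ⟨t, rfl⟩ := posterity_head parent relations_group d hd
  simp
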